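-- pv_equiv track=rewrite | github.com/abbbhhiii/Python_Intern_VRV_Assignment | Log_Analysis_Assignment1.py | detect_suspicious_activity
-- ===== SOURCE A (Python) =====
-- from collections import Counter
--
-- def detect_suspicious_activity(lines, threshold=10):
--     failed_attempts = Counter()
--     for line in lines:
--         if '401' in line:  # Check for failed login status
--             ip = line.split()[0]
--             failed_attempts[ip] += 1
--     suspicious_ips = {ip: count for ip, count in failed_attempts.items() if count > threshold}
--     return suspicious_ips
-- ===== SOURCE B (Python) =====
-- def detect_suspicious_activity(lines, threshold=10):
--     ips = [line.split()[0] for line in lines if '401' in line]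
--     out = {}
--     while ips:
--         ip = ips[0]
--         c = 1
--         rest = []
--         for x in ips[1:]:
--             if x == ip:
--                 c += 1
--             else:
--                 rest.append(x)
--         if c > threshold:
--             out[ip] = c
--         ips = rest
--     return out
-- ===== Notes on version B (the rewrite author's own statement) =====
-- stated objective: alternative
-- what changed: Replaces hash-based counting (Counter over all lines, then a threshold filter over its items) with a quickselect-style partition worklist: repeatedly take the first remaining IP, split the rest of the token list into occurrences of that IP (counted) and a leftover worklist, emit the IP if its count exceeds the threshold, and continue on the leftover; no counting container is ever built.
import Mathlib
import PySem

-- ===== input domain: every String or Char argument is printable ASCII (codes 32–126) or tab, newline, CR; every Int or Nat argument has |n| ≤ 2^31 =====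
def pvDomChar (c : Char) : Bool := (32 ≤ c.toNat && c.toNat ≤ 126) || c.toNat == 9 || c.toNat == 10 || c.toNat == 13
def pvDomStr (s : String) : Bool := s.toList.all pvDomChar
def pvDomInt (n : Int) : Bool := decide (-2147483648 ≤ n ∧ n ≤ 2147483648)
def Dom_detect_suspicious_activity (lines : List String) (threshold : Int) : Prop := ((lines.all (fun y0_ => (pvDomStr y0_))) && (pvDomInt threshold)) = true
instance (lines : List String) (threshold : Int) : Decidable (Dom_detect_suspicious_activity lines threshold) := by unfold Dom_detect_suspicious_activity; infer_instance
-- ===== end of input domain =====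

-- B replaces the Counter/dict counting with a quickselect-style partition worklist over the extracted tokens (alternative decomposition, not claimed faster).

-- ===== PORT A =====
-- line.split()[0]: exact via pyGetD, since a line containing '401' splits to a nonempty token list (A never raises here).
def detect_suspicious_activity (lines : List String) (threshold : Int) : List (String × Int) :=
  let failed_attempts : PySem.Dict String Int :=
    lines.foldl (fun d line =>
      if PySem.Str.isIn "401" line then
        d.modify (PySem.List.pyGetD (PySem.Str.split₀ line) 0 "") 0 (· + 1)
      else d) PySem.Dict.empty
  failed_attempts.items.filter (fun p => p.2 > threshold)

-- ===== PORT B =====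
-- the inner 'for x in ips[1:]' loop of Source B: count the head IP, collect the others
def pvScan (ip : String) (xs : List String) : Int × List String :=
  xs.foldl (fun p x => if x == ip then (p.1 + 1, p.2) else (p.1, p.2 ++ [x])) (1, [])

-- used by pvSweep's decreasing_by (termination of Source B's worklist loop)
theorem pvScan_snd_length_le (ip : String) (xs : List String) :
    (pvScan ip xs).2.length ≤ xs.length := by
  suffices h : ∀ (xs : List String) (c : Int) (acc : List String),
      (xs.foldl (fun p x => if x == ip then (p.1 + 1, p.2) else (p.1, p.2 ++ [x])) (c, acc)).2.length
        ≤ acc.length + xs.length by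
    simpa [pvScan] using h xs 1 []
  intro xs
  induction xs with
  | nil => intro c acc; simp
  | cons x xs ih =>
    intro c acc
    simp only [List.foldl_cons, List.length_cons]
    by_cases hx : (x == ip) = true
    · rw [if_pos hx]
      exact le_trans (ih (c + 1) acc) (by omega)
    · rw [if_neg hx]
      have := ih c (acc ++ [x])
      simp only [List.length_append, List.length_cons, List.length_nil] at this
      omega

-- Source B's 'while ips:' worklist loop
def pvSweep (threshold : Int) : List String → PySem.Dict String Int → PySem.Dict String Int
  | [], out => out
  | ip :: rest, out =>
    let p := pvScan ip rest
    pvSweep threshold p.2 (if p.1 > threshold then out.insert ip p.1 else out)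
  termination_by ips _ => ips.length
  decreasing_by exact Nat.lt_succ_of_le (pvScan_snd_length_le ip rest)

def detect_suspicious_activity_alt (lines : List String) (threshold : Int) : List (String × Int) :=
  let ips :=
    (lines.filter (fun line => PySem.Str.isIn "401" line)).map
      (fun line => PySem.List.pyGetD (PySem.Str.split₀ line) 0 "")
  (pvSweep threshold ips PySem.Dict.empty).items

-- ===== PRECONDITION & SPEC =====
def Spec_detect_suspicious_activity (lines : List String) (threshold : Int) (out : List (String × Int)) : Prop := out = detect_suspicious_activity_alt lines threshold
instance (lines : List String) (threshold : Int) (out : List (String × Int)) : Decidable (Spec_detect_suspicious_activity lines threshold out) := by unfold Spec_detect_suspicious_activity; infer_instance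

-- ===== CLAIM (what is proved, stated in full; the proofs are below) =====
def Claim_equal_detect_suspicious_activity : Prop := ∀ (lines : List String) (threshold : Int), Dom_detect_suspicious_activity lines threshold → Spec_detect_suspicious_activity lines threshold (detect_suspicious_activity lines threshold)

-- ===== LEMMAS AND PROOFS =====

-- A's conditional-increment loop over lines is the Counter loop over the extracted token list.
theorem foldl_cond_modify (lines : List String) (d : PySem.Dict String Int) :
    lines.foldl (fun d line =>
      if PySem.Str.isIn "401" line then
        d.modify (PySem.List.pyGetD (PySem.Str.split₀ line) 0 "") 0 (· + 1)
      else d) d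
    = ((lines.filter (fun line => PySem.Str.isIn "401" line)).map
        (fun line => PySem.List.pyGetD (PySem.Str.split₀ line) 0 "")).foldl
        (fun d x => d.modify x 0 (· + 1)) d := by
  induction lines generalizing d with
  | nil => rfl
  | cons l ls ih =>
    simp only [List.foldl_cons, List.filter_cons]
    by_cases h : PySem.Str.isIn "401" l = true
    · rw [if_pos h, if_pos h, List.map_cons, List.foldl_cons, ih]
    · rw [if_neg h, if_neg h, ih]

-- pvScan = (1 + #occurrences of the head IP, the other elements in order)
theorem pvScan_eq (ip : String) (xs : List String) :
    pvScan ip xs = (1 + (xs.count ip : Int), xs.filter (fun x => !(x == ip))) := by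
  suffices h : ∀ (xs : List String) (c : Int) (acc : List String),
      xs.foldl (fun p x => if x == ip then (p.1 + 1, p.2) else (p.1, p.2 ++ [x])) (c, acc)
        = (c + (xs.count ip : Int), acc ++ xs.filter (fun x => !(x == ip))) by
    simpa [pvScan] using h xs 1 []
  intro xs
  induction xs with
  | nil => intro c acc; simp
  | cons x xs ih =>
    intro c acc
    simp only [List.foldl_cons]
    by_cases hx : (x == ip) = true
    · have hc : List.count ip (x :: xs) = List.count ip xs + 1 := by
        simp [List.count_cons, hx]
      have hf : List.filter (fun y => !(y == ip)) (x :: xs)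
          = List.filter (fun y => !(y == ip)) xs := by
        simp [hx]
      rw [if_pos hx, ih (c + 1) acc, hc, hf]
      congr 1
      push_cast
      ring
    · rw [if_neg hx, ih c (acc ++ [x])]
      simp [List.count_cons, hx]

-- PySem dedup (foldl Set.add) ignores elements already in the accumulator
theorem foldl_add_of_mem (x : String) :
    ∀ (xs acc : List String), x ∈ acc →
      List.foldl PySem.Set.add acc xs
        = List.foldl PySem.Set.add acc (xs.filter (fun y => !(y == x))) := by
  intro xs
  induction xs with
  | nil => intro acc _; rfl
  | cons y ys ih =>
    intro acc hx
    by_cases hy : (y == x) = true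
    · have hyx : y = x := by simpa using hy
      have : PySem.Set.add acc y = acc := by
        simp [PySem.Set.add, PySem.Set.contains_eq_listContains, hyx, hx]
      simp only [List.filter_cons, hy, Bool.not_true, List.foldl_cons, this]
      exact ih acc hx
    · simp only [List.filter_cons, hy, Bool.not_false, List.foldl_cons]
      apply ih
      simp [PySem.Set.add]
      split <;> simp [hx]

-- a head element absent from the rest commutes out of the Set.add fold
theorem foldl_add_cons_of_not_mem (a : String) :
    ∀ (xs acc : List String), (∀ y ∈ xs, y ≠ a) →
      List.foldl PySem.Set.add (a :: acc) xs = a :: List.foldl PySem.Set.add acc xs := by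
  intro xs
  induction xs with
  | nil => intro acc _; rfl
  | cons y ys ih =>
    intro acc h
    have hya : y ≠ a := h y (by simp)
    have : PySem.Set.add (a :: acc) y
        = a :: PySem.Set.add acc y := by
      simp [PySem.Set.add, PySem.Set.contains_eq_listContains, hya]
      split <;> simp
    simp only [List.foldl_cons, this]
    exact ih _ (fun z hz => h z (by simp [hz]))

-- first-occurrence dedup unfolds one step of the partition
theorem dedup_cons_filter (x : String) (xs : List String) :
    PySem.List.dedup (x :: xs) = x :: PySem.List.dedup (xs.filter (fun y => !(y == x))) := by
  have h1 : PySem.List.dedup (x :: xs) = List.foldl PySem.Set.add [x] xs := by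
    simp [PySem.List.dedup, PySem.Set.ofList, PySem.Set.empty_eq, PySem.Set.add,
      PySem.Set.contains_eq_listContains]
  rw [h1, foldl_add_of_mem x xs [x] (by simp),
    foldl_add_cons_of_not_mem x _ [] (by intro y hy; simpa using (List.of_mem_filter hy))]
  rfl

-- the worklist loop emits exactly the over-threshold (first-occurrence, count) pairs
theorem pvSweep_items (th : Int) :
    ∀ (n : Nat) (ips : List String) (d : PySem.Dict String Int), ips.length ≤ n →
      (∀ x ∈ ips, d.contains x = false) →
      (pvSweep th ips d).items
        = d.items ++ ((PySem.List.dedup ips).map (fun k => (k, (ips.count k : Int)))).filter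
            (fun p => p.2 > th) := by
  intro n
  induction n with
  | zero =>
    intro ips d h _
    have : ips = [] := List.eq_nil_of_length_eq_zero (Nat.le_zero.mp h)
    subst this; simp [pvSweep, PySem.List.dedup, PySem.Set.ofList, PySem.Set.empty_eq]
  | succ m ih =>
    intro ips d hlen hfresh
    match ips with
    | [] => simp [pvSweep, PySem.List.dedup, PySem.Set.ofList, PySem.Set.empty_eq]
    | ip :: rest =>
      have hscan := pvScan_eq ip rest
      set rest' := rest.filter (fun x => !(x == ip)) with hrest'
      have hcnt : (pvScan ip rest).1 = 1 + (rest.count ip : Int) := by rw [hscan]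
      have hsnd : (pvScan ip rest).2 = rest' := by rw [hscan]
      have hstep : pvSweep th (ip :: rest) d
          = pvSweep th rest'
              (if (1 + (rest.count ip : Int)) > th then d.insert ip (1 + (rest.count ip : Int)) else d) := by
        rw [pvSweep]; rw [hcnt, hsnd]
      -- counts of survivors are unchanged by dropping the head IP's occurrences
      have hcount : ∀ k ∈ PySem.List.dedup rest', ((ip :: rest).count k : Int) = (rest'.count k : Int) := by
        intro k hk
        have hkr : k ∈ rest' := by simpa [PySem.List.mem_dedup] using hk
        have hkip : (k == ip) = false := by
          have := List.of_mem_filter hkr; simpa using this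
        have : k ≠ ip := by simpa using hkip
        rw [List.count_cons]
        simp [hkip, hrest', List.count_filter, beq_iff_eq]
        exact fun h => this h.symm
      have hd' : ∀ x ∈ rest',
          ((if (1 + (rest.count ip : Int)) > th then d.insert ip (1 + (rest.count ip : Int)) else d)).contains x = false := by
        intro x hx
        have hxr : x ∈ rest := List.mem_of_mem_filter hx
        have hxip : (x == ip) = false := by have := List.of_mem_filter hx; simpa using this
        have hxd : d.contains x = false := hfresh x (by simp [hxr])
        split
        · rw [PySem.Dict.contains_insert]; simp [hxip, hxd]
        · exact hxd
      have hlen' : rest'.length ≤ m := by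
        have hfl := List.length_filter_le (fun x => !(x == ip)) rest
        rw [hrest']
        simp only [List.length_cons] at hlen
        omega
      rw [hstep, ih rest' _ hlen' hd', dedup_cons_filter, ← hrest']
      have hipfresh : d.contains ip = false := hfresh ip (by simp)
      have hmap :
          (PySem.List.dedup rest').map (fun k => (k, ((ip :: rest).count k : Int)))
            = (PySem.List.dedup rest').map (fun k => (k, (rest'.count k : Int))) := by
        apply List.map_congr_left
        intro k hk
        exact congrArg _ (hcount k hk)
      have hcnthead : ((ip :: rest).count ip : Int) = 1 + (rest.count ip : Int) := by
        rw [List.count_cons]; simp; ring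
      rw [List.map_cons, List.filter_cons, hmap]
      simp only [hcnthead]
      by_cases hth : th < 1 + (rest.count ip : Int)
      · rw [if_pos hth, if_pos (by simpa using hth),
          PySem.Dict.items_insert_of_not_contains _ _ hipfresh]
        simp
      · rw [if_neg hth, if_neg (by simpa using hth)]

-- ===== VERDICT (by name: the statement is the Claim_ definition above) =====
theorem detect_suspicious_activity_spec : Claim_equal_detect_suspicious_activity := by
  intro lines threshold _
  unfold Spec_detect_suspicious_activity detect_suspicious_activity detect_suspicious_activity_alt
  simp only [foldl_cond_modify, ← PySem.Dict.counter_eq_foldl, PySem.Dict.items_counter,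
    ← PySem.List.dedup_eq_ofList]
  rw [pvSweep_items threshold _ _ PySem.Dict.empty le_rfl (by intro x _; simp [PySem.Dict.contains_empty])]
  have hemp : (PySem.Dict.empty : PySem.Dict String Int).items = [] := rfl
  rw [hemp, List.nil_append]
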